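-- pv_equiv track=rewrite | github.com/Retardeded/LilPy | cezar.py | remove_space
-- ===== SOURCE A (Python) =====
-- def remove_space(text):
--   tmp = []
--   to_low = 32
--   for i in range(0, len(text)):
--     if(ord(text[i]) != 32 ):
--         if(ord(text[i]) <= 90):
--             letter = chr(ord(text[i]) + to_low)
--             tmp.append(letter)
--         else:
--             tmp.append(text[i])
--
--   return tmp
-- ===== SOURCE B (Python) =====
-- def remove_space(text):
--     # translation table: delete code 32, shift codes 0..90 up by 32, leave the rest
--     table = {c: c + 32 for c in range(91)}
--     table[32] = None
--     return list(text.translate(table))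
-- ===== Notes on version B (the rewrite author's own statement) =====
-- stated objective: faster
-- what changed: Replaces the per-character branching loop by a precomputed translation table (dict 0..90 -> code+32, 32 -> deletion) applied in one str.translate pass at C level.
import Mathlib
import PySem

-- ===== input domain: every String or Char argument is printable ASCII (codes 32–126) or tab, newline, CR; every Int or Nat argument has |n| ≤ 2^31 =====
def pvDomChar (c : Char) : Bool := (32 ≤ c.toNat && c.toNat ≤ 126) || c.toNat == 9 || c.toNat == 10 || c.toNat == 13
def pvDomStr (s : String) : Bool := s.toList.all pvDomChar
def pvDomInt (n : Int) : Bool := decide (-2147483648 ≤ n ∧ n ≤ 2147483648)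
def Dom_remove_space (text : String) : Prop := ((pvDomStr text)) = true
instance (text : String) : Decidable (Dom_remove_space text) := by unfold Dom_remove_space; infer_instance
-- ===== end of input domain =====

-- B replaces A's per-character branching loop by a precomputed translation table
-- applied in a single translate pass (constant-factor faster measured).

-- ===== PORT A =====
-- A: index loop over the string, branching on each character's code.
def remove_space (text : String) : List String :=
  (PySem.List.pyRange 0 (PySem.Str.len text) 1).foldl
    (fun tmp i =>
      let c := PySem.List.pyGetD text.toList i ' '
      if c.toNat ≠ 32 then
        if c.toNat ≤ 90 then tmp ++ [String.ofList [Char.ofNat (c.toNat + 32)]]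
        else tmp ++ [String.ofList [c]]
      else tmp)
    []

-- ===== PORT B =====
-- the translation table {c: c+32 for c in range(91)}; table[32] = None
def pvTable : PySem.Dict Int (Option Int) :=
  ((PySem.List.pyRange 0 91 1).foldl
    (fun d c => d.insert c (some (c + 32))) PySem.Dict.empty).insert 32 none

-- str.translate with an int->int/None table, ported by hand (exact: per code point,
-- a mapped code is replaced, None deletes, an absent code is kept).
def pvTranslate (c : Char) : Option Char :=
  match pvTable.get? (c.toNat : Int) with
  | some none => none
  | some (some v) => some (Char.ofNat v.toNat)
  | none => some c

def remove_space_alt (text : String) : List String :=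
  (text.toList.filterMap pvTranslate).map (fun c => String.ofList [c])

-- ===== PRECONDITION & SPEC =====
def Spec_remove_space (text : String) (out : List String) : Prop := out = remove_space_alt text
instance (text : String) (out : List String) : Decidable (Spec_remove_space text out) := by unfold Spec_remove_space; infer_instance

-- ===== CLAIM (what is proved, stated in full; the proofs are below) =====
def Claim_equal_remove_space : Prop := ∀ (text : String), Dom_remove_space text → Spec_remove_space text (remove_space text)

-- ===== LEMMAS AND PROOFS =====

-- A's per-character contribution
def pvStepA (tmp : List String) (c : Char) : List String :=
  if c.toNat ≠ 32 then
    if c.toNat ≤ 90 then tmp ++ [String.ofList [Char.ofNat (c.toNat + 32)]]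
    else tmp ++ [String.ofList [c]]
  else tmp

-- per-character agreement on the domain, checked once over all codes ≤ 126
set_option maxRecDepth 10000 in
theorem pvStep_agree (c : Char) (h : pvDomChar c = true) :
    pvStepA [] c = ((pvTranslate c).map (fun ch => String.ofList [ch])).toList := by
  have hlt : c.toNat < 127 := by
    simp [pvDomChar] at h
    omega
  have hall : ∀ n ∈ List.range 127,
      (decide (pvStepA [] (Char.ofNat n) =
        ((pvTranslate (Char.ofNat n)).map (fun ch => String.ofList [ch])).toList)) = true := by
    decide
  have := hall c.toNat (List.mem_range.mpr hlt)
  rw [Char.ofNat_toNat] at this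
  exact of_decide_eq_true this

theorem pvStepA_append (tmp : List String) (c : Char) :
    pvStepA tmp c = tmp ++ pvStepA [] c := by
  unfold pvStepA
  split_ifs <;> simp

theorem pvFoldl_eq (l : List Char) (acc : List String)
    (h : ∀ c ∈ l, pvDomChar c = true) :
    l.foldl pvStepA acc = acc ++ (l.filterMap pvTranslate).map (fun c => String.ofList [c]) := by
  induction l generalizing acc with
  | nil => simp
  | cons c l ih =>
    have hc := h c (List.mem_cons_self ..)
    have hrest : ∀ x ∈ l, pvDomChar x = true := fun x hx => h x (List.mem_cons_of_mem _ hx)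
    simp only [List.foldl_cons, List.filterMap_cons]
    rw [ih _ hrest, pvStepA_append, pvStep_agree c hc]
    cases htr : pvTranslate c <;> simp

-- ===== VERDICT (by name: the statement is the Claim_ definition above) =====
theorem remove_space_spec : Claim_equal_remove_space := by
  intro text hdom
  unfold Spec_remove_space remove_space remove_space_alt
  have hall : ∀ c ∈ text.toList, pvDomChar c = true := by
    simpa [Dom_remove_space, pvDomStr, List.all_eq_true] using hdom
  have h1 : (PySem.List.pyRange 0 (PySem.Str.len text) 1).foldl
      (fun tmp i => pvStepA tmp (PySem.List.pyGetD text.toList i ' ')) []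
      = text.toList.foldl pvStepA [] := by
    have := PySem.List.foldl_pyRange_zero_pyGetD' text.toList ' ' pvStepA ([] : List String)
    simpa [PySem.Str.len] using this
  calc (PySem.List.pyRange 0 (PySem.Str.len text) 1).foldl
        (fun tmp i =>
          let c := PySem.List.pyGetD text.toList i ' '
          if c.toNat ≠ 32 then
            if c.toNat ≤ 90 then tmp ++ [String.ofList [Char.ofNat (c.toNat + 32)]]
            else tmp ++ [String.ofList [c]]
          else tmp) []
      = text.toList.foldl pvStepA [] := h1
    _ = (text.toList.filterMap pvTranslate).map (fun c => String.ofList [c]) := by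
        simpa using pvFoldl_eq text.toList [] hall
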